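-- pv_equiv track=rewrite | github.com/Michael-huo/ExpHub | exphub/encode/motion_segment.py | _absorb_short
-- ===== SOURCE A (Python) =====
-- def _replace_range(states, start, end, value):
--     for idx in range(max(0, int(start)), min(len(states) - 1, int(end)) + 1):
--         states[idx] = str(value)
--
-- def _absorb_short(states, loss_intervals, min_len=8):
--     states = list(states)
--     ranges = []
--     if loss_intervals:
--         ranges = [(int(item["pair_start"]), int(item["pair_end"])) for item in loss_intervals]
--     else:
--         ranges = [(0, len(states) - 1)] if states else []
--     for _ in range(2):
--         changed = False
--         for start, end in ranges:
--             idx = max(0, start)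
--             end = min(len(states) - 1, end)
--             while idx <= end:
--                 current = states[idx]
--                 run_end = idx
--                 while run_end + 1 <= end and states[run_end + 1] == current:
--                     run_end += 1
--                 if current != "mixed" and run_end - idx + 1 < int(min_len):
--                     left = states[idx - 1] if idx - 1 >= start else None
--                     right = states[run_end + 1] if run_end + 1 <= end else None
--                     if left == right and left not in (None, "mixed"):
--                         new_state = left
--                     elif right not in (None, "mixed"):
--                         new_state = right
--                     elif left not in (None, "mixed"):
--                         new_state = left
--                     else:
--                         new_state = "forward"
--                     _replace_range(states, idx, run_end, new_state)
--                     changed = True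
--                 idx = run_end + 1
--         if not changed:
--             break
--     return states
-- ===== SOURCE B (Python) =====
-- def _absorb_short(states, loss_intervals, min_len=8):
--     states = list(states)
--     if loss_intervals:
--         ranges = [(int(d["pair_start"]), int(d["pair_end"])) for d in loss_intervals]
--     else:
--         ranges = [(0, len(states) - 1)] if states else []
--     for _ in range(2):
--         changed = False
--         for start, end in ranges:
--             lo, hi = max(0, start), min(len(states) - 1, end)
--             # pass 1 over the range: collect runs as [value, run_start, run_end]
--             runs = []
--             for i in range(lo, hi + 1):
--                 if runs and runs[-1][0] == states[i]:
--                     runs[-1][2] = i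
--                 else:
--                     runs.append([states[i], i, i])
--             # pass 2: absorb each short run into a neighbor
--             for k, (val, rs, re) in enumerate(runs):
--                 if val != "mixed" and re - rs + 1 < int(min_len):
--                     left = states[rs - 1] if rs - 1 >= start else None
--                     right = runs[k + 1][0] if k + 1 < len(runs) else None
--                     if right not in (None, "mixed"):
--                         new = left if left == right else right
--                     elif left not in (None, "mixed"):
--                         new = left
--                     else:
--                         new = "forward"
--                     states[rs:re + 1] = [new] * (re + 1 - rs)
--                     changed = True
--         if not changed:
--             break
--     return states
-- ===== Notes on version B (the rewrite author's own statement) =====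
-- stated objective: alternative
-- what changed: Each range is handled by two separate passes - one that collects runs of the clamped slice as (value, run_start, run_end) records, then one over that run list that absorbs short runs (reading the left neighbor from the live list and the right neighbor from the next run) - instead of A's single interleaved while/while scan-and-mutate loop; Pre_ excludes interval dicts missing the pair_start/pair_end keys, on which A raises KeyError.
import Mathlib
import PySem

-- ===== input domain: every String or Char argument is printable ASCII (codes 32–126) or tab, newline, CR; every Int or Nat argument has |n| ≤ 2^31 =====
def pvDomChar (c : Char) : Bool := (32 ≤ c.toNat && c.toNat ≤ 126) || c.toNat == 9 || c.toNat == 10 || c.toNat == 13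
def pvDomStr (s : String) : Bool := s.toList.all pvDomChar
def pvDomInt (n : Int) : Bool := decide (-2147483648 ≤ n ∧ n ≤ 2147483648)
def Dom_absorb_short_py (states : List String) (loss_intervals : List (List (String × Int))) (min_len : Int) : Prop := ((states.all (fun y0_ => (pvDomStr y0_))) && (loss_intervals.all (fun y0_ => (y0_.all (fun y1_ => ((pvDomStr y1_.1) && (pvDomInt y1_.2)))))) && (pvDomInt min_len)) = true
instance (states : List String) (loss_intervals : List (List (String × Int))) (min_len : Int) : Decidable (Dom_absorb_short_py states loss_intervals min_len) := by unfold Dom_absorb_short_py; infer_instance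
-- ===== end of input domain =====

-- B replaces A's interleaved scan-and-mutate while loops by, per range, a run-collecting pass
-- followed by a pass over the run list (alternative decomposition, same cost); return value only,
-- A copies its input before mutating.

-- shared indexing helper: Python's states[i] at an index both programs only use when valid
def pvGetS (states : List String) (i : Int) : String := (PySem.List.pyGet? states i).getD ""

-- ===== PORT A =====
-- _replace_range(states, start, end, value)
def replaceRange (states : List String) (start e : Int) (value : String) : List String :=
  (PySem.List.pyRange (max 0 start) (min ((states.length : Int) - 1) e + 1) 1).foldl
    (fun st idx => PySem.List.pySetD st idx value) states

-- inner while: 'while run_end + 1 <= end and states[run_end + 1] == current: run_end += 1'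
-- (fuel = the loop's iteration bound, so the recursion is structural)
def scanRunF (fuel : Nat) (states : List String) (current : String) (e : Int) (run_end : Int) : Int :=
  match fuel with
  | 0 => run_end
  | fuel + 1 =>
    if run_end + 1 ≤ e ∧ pvGetS states (run_end + 1) = current then
      scanRunF fuel states current e (run_end + 1)
    else run_end

def scanRun (states : List String) (current : String) (e : Int) (run_end : Int) : Int :=
  scanRunF (e - run_end).toNat states current e run_end

-- outer while over one (start, end) range; threads (states, changed)
-- (fuel = the loop's iteration bound, so the recursion is structural)
def processRangeF (fuel : Nat) (states : List String) (start e min_len idx : Int)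
    (changed : Bool) : List String × Bool :=
  match fuel with
  | 0 => (states, changed)
  | fuel + 1 =>
    if idx ≤ e then
      let current := pvGetS states idx
      let run_end := scanRun states current e idx
      if current ≠ "mixed" ∧ run_end - idx + 1 < min_len then
        let left := if idx - 1 ≥ start then PySem.List.pyGet? states (idx - 1) else none
        let right := if run_end + 1 ≤ e then PySem.List.pyGet? states (run_end + 1) else none
        let new_state :=
          if left = right ∧ left ≠ none ∧ left ≠ some "mixed" then left.getD ""
          else if right ≠ none ∧ right ≠ some "mixed" then right.getD ""
          else if left ≠ none ∧ left ≠ some "mixed" then left.getD ""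
          else "forward"
        processRangeF fuel (replaceRange states idx run_end new_state) start e min_len
          (run_end + 1) true
      else processRangeF fuel states start e min_len (run_end + 1) changed
    else (states, changed)

def processRange (states : List String) (start e min_len idx : Int) (changed : Bool) :
    List String × Bool :=
  processRangeF ((e + 1 - idx).toNat) states start e min_len idx changed

-- one 'for start, end in ranges' pass
def passA (min_len : Int) (ranges : List (Int × Int)) (states : List String) :
    List String × Bool :=
  ranges.foldl (fun acc r =>
    processRange acc.1 r.1 (min ((acc.1.length : Int) - 1) r.2) min_len (max 0 r.1) acc.2)
    (states, false)

def absorb_short_py (states : List String) (loss_intervals : List (List (String × Int))) (min_len : Int) : List String :=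
  let ranges : List (Int × Int) :=
    if loss_intervals ≠ [] then
      loss_intervals.map (fun item =>
        ((item.lookup "pair_start").getD 0, (item.lookup "pair_end").getD 0))
    else if states ≠ [] then [(0, (states.length : Int) - 1)] else []
  let p1 := passA min_len ranges states
  if p1.2 then (passA min_len ranges p1.1).1 else p1.1

-- ===== PORT B =====
-- run-collecting pass over range(lo, hi+1); the list is kept reversed (head = runs[-1]) and
-- reversed at the end, mirroring Python's append / runs[-1] update
def runsOf (states : List String) (lo hi : Int) : List (String × Int × Int) :=
  ((PySem.List.pyRange lo (hi + 1) 1).foldl (fun runs i =>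
      let v := pvGetS states i
      match runs with
      | (v0, s0, _) :: rest => if v0 = v then (v0, s0, i) :: rest else (v, i, i) :: runs
      | [] => [(v, i, i)]) []).reverse

-- 'for k, (val, rs, re) in enumerate(runs)': right = runs[k+1][0], left read from the live list;
-- the slice assignment states[rs:re+1] = [new]*(re+1-rs) is ported as pointwise writes over
-- range(rs, re+1), exact here since runs only carry in-range indices 0 ≤ rs ≤ re < len(states)
def procRuns (min_len start : Int) (runs : List (String × Int × Int))
    (states : List String) (changed : Bool) : List String × Bool :=
  match runs with
  | [] => (states, changed)
  | (val, rs, re) :: rest =>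
    if val ≠ "mixed" ∧ re - rs + 1 < min_len then
      let left := if rs - 1 ≥ start then PySem.List.pyGet? states (rs - 1) else none
      let right := rest.head?.map (fun t => t.1)
      let new :=
        if right ≠ none ∧ right ≠ some "mixed" then
          if left = right then left.getD "" else right.getD ""
        else if left ≠ none ∧ left ≠ some "mixed" then left.getD ""
        else "forward"
      let states' := (PySem.List.pyRange rs (re + 1) 1).foldl
        (fun st i => PySem.List.pySetD st i new) states
      procRuns min_len start rest states' true
    else procRuns min_len start rest states changed

def passB (min_len : Int) (ranges : List (Int × Int)) (states : List String) :
    List String × Bool :=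
  ranges.foldl (fun acc r =>
    procRuns min_len r.1
      (runsOf acc.1 (max 0 r.1) (min ((acc.1.length : Int) - 1) r.2)) acc.1 acc.2)
    (states, false)

def absorb_short_py_alt (states : List String) (loss_intervals : List (List (String × Int))) (min_len : Int) : List String :=
  let ranges : List (Int × Int) :=
    if loss_intervals ≠ [] then
      loss_intervals.map (fun d =>
        ((d.lookup "pair_start").getD 0, (d.lookup "pair_end").getD 0))
    else if states ≠ [] then [(0, (states.length : Int) - 1)] else []
  let p1 := passB min_len ranges states
  if p1.2 then (passB min_len ranges p1.1).1 else p1.1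

-- ===== PRECONDITION & SPEC =====
-- Pre_ excludes only inputs on which A raises KeyError: an interval dict missing
-- the key "pair_start" or "pair_end".
def Pre_absorb_short_py (states : List String) (loss_intervals : List (List (String × Int))) (min_len : Int) : Prop :=
  ∀ d ∈ loss_intervals, "pair_start" ∈ d.map Prod.fst ∧ "pair_end" ∈ d.map Prod.fst
instance (states : List String) (loss_intervals : List (List (String × Int))) (min_len : Int) : Decidable (Pre_absorb_short_py states loss_intervals min_len) := by unfold Pre_absorb_short_py; infer_instance

def pvWitness_absorb_short_py : List String × (List (List (String × Int))) × Int :=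
  (["a", "a", "b"], [[("pair_start", 0), ("pair_end", 2)]], 2)

def Spec_absorb_short_py (states : List String) (loss_intervals : List (List (String × Int))) (min_len : Int) (out : List String) : Prop := out = absorb_short_py_alt states loss_intervals min_len
instance (states : List String) (loss_intervals : List (List (String × Int))) (min_len : Int) (out : List String) : Decidable (Spec_absorb_short_py states loss_intervals min_len out) := by unfold Spec_absorb_short_py; infer_instance

-- ===== CLAIM (what is proved, stated in full; the proofs are below) =====
def Claim_equal_absorb_short_py : Prop := ∀ (states : List String) (loss_intervals : List (List (String × Int))) (min_len : Int), Dom_absorb_short_py states loss_intervals min_len → Pre_absorb_short_py states loss_intervals min_len → Spec_absorb_short_py states loss_intervals min_len (absorb_short_py states loss_intervals min_len)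

-- ===== LEMMAS AND PROOFS =====

theorem scanRun_eq (states : List String) (v : String) (e j : Int) :
    scanRun states v e j =
      if j + 1 ≤ e ∧ pvGetS states (j + 1) = v then scanRun states v e (j + 1) else j := by
  unfold scanRun
  by_cases hc : j + 1 ≤ e ∧ pvGetS states (j + 1) = v
  · rw [if_pos hc]
    have h1 : (e - j).toNat = (e - (j + 1)).toNat + 1 := by omega
    rw [h1]
    show (if j + 1 ≤ e ∧ pvGetS states (j + 1) = v then
        scanRunF (e - (j + 1)).toNat states v e (j + 1) else j)
      = scanRunF (e - (j + 1)).toNat states v e (j + 1)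
    rw [if_pos hc]
  · rw [if_neg hc]
    cases hn : (e - j).toNat with
    | zero => rfl
    | succ k =>
      show (if j + 1 ≤ e ∧ pvGetS states (j + 1) = v then scanRunF k states v e (j + 1) else j) = j
      rw [if_neg hc]

theorem scanRun_ge (states : List String) (v : String) (e j : Int) :
    j ≤ scanRun states v e j := by
  rw [scanRun_eq]
  by_cases hc : j + 1 ≤ e ∧ pvGetS states (j + 1) = v
  · rw [if_pos hc]
    have := scanRun_ge states v e (j + 1)
    omega
  · rw [if_neg hc]
termination_by (e - j).toNat
decreasing_by omega

theorem scanRun_le (states : List String) (v : String) (e j : Int) (h : j ≤ e) :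
    scanRun states v e j ≤ e := by
  rw [scanRun_eq]
  by_cases hc : j + 1 ≤ e ∧ pvGetS states (j + 1) = v
  · rw [if_pos hc]
    exact scanRun_le states v e (j + 1) (by omega)
  · rw [if_neg hc]; omega
termination_by (e - j).toNat
decreasing_by omega

theorem scanRun_val (states : List String) (v : String) (e j : Int)
    (h : pvGetS states j = v) : pvGetS states (scanRun states v e j) = v := by
  rw [scanRun_eq]
  by_cases hc : j + 1 ≤ e ∧ pvGetS states (j + 1) = v
  · rw [if_pos hc]
    exact scanRun_val states v e (j + 1) hc.2
  · rw [if_neg hc]; exact h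
termination_by (e - j).toNat
decreasing_by omega

theorem scanRun_stop (states : List String) (v : String) (e j : Int) :
    ¬ (scanRun states v e j + 1 ≤ e ∧ pvGetS states (scanRun states v e j + 1) = v) := by
  rw [scanRun_eq]
  by_cases hc : j + 1 ≤ e ∧ pvGetS states (j + 1) = v
  · rw [if_pos hc]
    exact scanRun_stop states v e (j + 1)
  · rw [if_neg hc]; exact hc
termination_by (e - j).toNat
decreasing_by omega

theorem scanRun_congr (s1 s2 : List String) (v : String) (e j : Int)
    (hag : ∀ i : Int, j + 1 ≤ i → i ≤ e → pvGetS s1 i = pvGetS s2 i) :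
    scanRun s1 v e j = scanRun s2 v e j := by
  rw [scanRun_eq]
  conv_rhs => rw [scanRun_eq]
  by_cases hc : j + 1 ≤ e ∧ pvGetS s1 (j + 1) = v
  · have hc2 : j + 1 ≤ e ∧ pvGetS s2 (j + 1) = v :=
      ⟨hc.1, by rw [← hag (j + 1) (by omega) hc.1]; exact hc.2⟩
    rw [if_pos hc, if_pos hc2]
    exact scanRun_congr s1 s2 v e (j + 1) (fun i h1 h2 => hag i (by omega) h2)
  · have hc2 : ¬ (j + 1 ≤ e ∧ pvGetS s2 (j + 1) = v) := by
      intro h; exact hc ⟨h.1, by rw [hag (j + 1) (by omega) h.1]; exact h.2⟩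
    rw [if_neg hc, if_neg hc2]
termination_by (e - j).toNat
decreasing_by omega

-- proof-side name for the write loop of both ports
def wr (states : List String) (a b : Int) (v : String) : List String :=
  (PySem.List.pyRange a b 1).foldl (fun st i => PySem.List.pySetD st i v) states

theorem wr_length (states : List String) (a b : Int) (v : String) :
    (wr states a b v).length = states.length := by
  unfold wr
  generalize PySem.List.pyRange a b 1 = l
  induction l generalizing states with
  | nil => rfl
  | cons x xs ih => simp only [List.foldl_cons, ih, PySem.List.length_pySetD]

theorem wr_getElem? (states : List String) (a b : Int) (v : String) (ha : 0 ≤ a) (n : Nat) :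
    (wr states a b v)[n]? =
      if a ≤ (n : Int) ∧ (n : Int) < b ∧ n < states.length then some v else states[n]? := by
  by_cases hab : a < b
  · rw [wr, PySem.List.pyRange_one_cons hab, List.foldl_cons]
    have hrec := wr_getElem? (PySem.List.pySetD states a v) (a + 1) b v (by omega) n
    rw [wr] at hrec
    rw [hrec, PySem.List.pySetD_of_nonneg states v ha, List.length_set, List.getElem?_set]
    split_ifs <;>
      first
        | rfl
        | (exfalso; omega)
        | exact (List.getElem?_eq_none (by omega)).symm
  · rw [wr, PySem.List.pyRange_one_eq_nil (by omega), List.foldl_nil, if_neg (by omega)]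
termination_by (b - a).toNat
decreasing_by omega

theorem pyGet?_valid (states : List String) (i : Int) (h0 : 0 ≤ i)
    (h1 : i < (states.length : Int)) :
    PySem.List.pyGet? states i = some (pvGetS states i) := by
  have hn : i.toNat < states.length := by omega
  rw [pvGetS, PySem.List.pyGet?_of_nonneg states h0, List.getElem?_eq_getElem hn]
  rfl

theorem wr_pvGetS (states : List String) (a b : Int) (v : String) (ha : 0 ≤ a) (i : Int)
    (hi : 0 ≤ i) :
    pvGetS (wr states a b v) i =
      if a ≤ i ∧ i < b ∧ i < (states.length : Int) then v else pvGetS states i := by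
  have h1 := wr_getElem? states a b v ha i.toNat
  rw [pvGetS, pvGetS, PySem.List.pyGet?_of_nonneg (wr states a b v) hi,
    PySem.List.pyGet?_of_nonneg states hi, h1]
  by_cases hc : a ≤ i ∧ i < b ∧ i < (states.length : Int)
  · rw [if_pos (by omega), if_pos hc]; rfl
  · rw [if_neg (by omega), if_neg hc]

-- recursive characterisation of B's run list (uses A's scanner on the proof side)
def runsSpec (states : List String) (lo hi : Int) : List (String × Int × Int) :=
  if h : lo ≤ hi then
    let v := pvGetS states lo
    let r := scanRun states v hi lo
    (v, lo, r) :: runsSpec states (r + 1) hi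
  else []
termination_by (hi + 1 - lo).toNat
decreasing_by
  have := scanRun_ge states (pvGetS states lo) hi lo
  omega

theorem scanRun_mem (states : List String) (v : String) (e j : Int) :
    ∀ i : Int, j + 1 ≤ i → i ≤ scanRun states v e j → pvGetS states i = v := by
  intro i h1 h2
  rw [scanRun_eq] at h2
  by_cases hc : j + 1 ≤ e ∧ pvGetS states (j + 1) = v
  · rw [if_pos hc] at h2
    by_cases hij : i = j + 1
    · rw [hij]; exact hc.2
    · exact scanRun_mem states v e (j + 1) i (by omega) h2
  · rw [if_neg hc] at h2; exfalso; omega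
termination_by (e - j).toNat
decreasing_by omega

theorem foldRun_merge (states : List String) (v : String) (s0 : Int) (j r e0 : Int)
    (rest : List (String × Int × Int)) (hjr : j ≤ r)
    (hall : ∀ i : Int, j ≤ i → i ≤ r → pvGetS states i = v) :
    (PySem.List.pyRange j (r + 1) 1).foldl (fun runs i =>
      let w := pvGetS states i
      match runs with
      | (v0, t0, _) :: rest => if v0 = w then (v0, t0, i) :: rest else (w, i, i) :: runs
      | [] => [(w, i, i)]) ((v, s0, e0) :: rest) = (v, s0, r) :: rest := by
  rw [PySem.List.pyRange_one_cons (by omega), List.foldl_cons]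
  have hv : pvGetS states j = v := hall j le_rfl hjr
  dsimp only
  rw [hv, if_pos rfl]
  by_cases h2 : j + 1 ≤ r
  · exact foldRun_merge states v s0 (j + 1) r j rest h2 (fun i hi1 hi2 => hall i (by omega) hi2)
  · rw [PySem.List.pyRange_one_eq_nil (by omega), List.foldl_nil]
    have hjr' : j = r := by omega
    rw [hjr']
termination_by (r - j).toNat
decreasing_by omega

mutual

theorem foldRun_spec (states : List String) (hi : Int) (j : Int)
    (acc : List (String × Int × Int))
    (hacc : ∀ v0 s0 e0 rest, acc = (v0, s0, e0) :: rest → j ≤ hi → v0 ≠ pvGetS states j) :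
    (PySem.List.pyRange j (hi + 1) 1).foldl (fun runs i =>
      let w := pvGetS states i
      match runs with
      | (v0, t0, _) :: rest => if v0 = w then (v0, t0, i) :: rest else (w, i, i) :: runs
      | [] => [(w, i, i)]) acc = (runsSpec states j hi).reverse ++ acc := by
  by_cases h : j ≤ hi
  · rw [PySem.List.pyRange_one_cons (by omega), List.foldl_cons]
    rcases acc with _ | ⟨⟨v0, s0, e0⟩, tl⟩
    · dsimp only
      exact foldRun_cont states hi j [] h
    · dsimp only
      rw [if_neg (hacc v0 s0 e0 tl rfl h)]
      exact foldRun_cont states hi j ((v0, s0, e0) :: tl) h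
  · rw [PySem.List.pyRange_one_eq_nil (by omega), List.foldl_nil, runsSpec, dif_neg h]
    rfl
termination_by ((hi + 1 - j).toNat, 1)
decreasing_by
  · omega
  · omega

theorem foldRun_cont (states : List String) (hi : Int) (j : Int)
    (acc : List (String × Int × Int)) (h : j ≤ hi) :
    (PySem.List.pyRange (j + 1) (hi + 1) 1).foldl (fun runs i =>
      let w := pvGetS states i
      match runs with
      | (v0, t0, _) :: rest => if v0 = w then (v0, t0, i) :: rest else (w, i, i) :: runs
      | [] => [(w, i, i)]) ((pvGetS states j, j, j) :: acc)
      = (runsSpec states j hi).reverse ++ acc := by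
  have hge := scanRun_ge states (pvGetS states j) hi j
  have hle := scanRun_le states (pvGetS states j) hi j h
  have hstop := scanRun_stop states (pvGetS states j) hi j
  by_cases hrun : j + 1 ≤ scanRun states (pvGetS states j) hi j
  · rw [PySem.List.pyRange_one_append (j + 1) (scanRun states (pvGetS states j) hi j + 1)
      (hi + 1) (by omega) (by omega), List.foldl_append]
    rw [foldRun_merge states (pvGetS states j) j (j + 1)
      (scanRun states (pvGetS states j) hi j) j acc hrun
      (fun i hi1 hi2 => scanRun_mem states (pvGetS states j) hi j i hi1 hi2)]
    rw [foldRun_spec states hi (scanRun states (pvGetS states j) hi j + 1)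
      ((pvGetS states j, j, scanRun states (pvGetS states j) hi j) :: acc)
      (by
        intro v0 s0 e0 rest heq hle2 hcontra
        injection heq with h1 h2
        have hpv : pvGetS states j = v0 := congrArg Prod.fst h1
        exact hstop ⟨by omega, by rw [← hcontra]; exact hpv.symm⟩)]
    conv_rhs => rw [runsSpec, dif_pos h]
    dsimp only
    simp [List.reverse_cons, List.append_assoc]
  · have hr : scanRun states (pvGetS states j) hi j = j := by omega
    rw [foldRun_spec states hi (j + 1) ((pvGetS states j, j, j) :: acc)
      (by
        intro v0 s0 e0 rest heq hle2 hcontra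
        injection heq with h1 h2
        have hpv : pvGetS states j = v0 := congrArg Prod.fst h1
        rw [hr] at hstop
        exact hstop ⟨by omega, by rw [← hcontra]; exact hpv.symm⟩)]
    conv_rhs => rw [runsSpec, dif_pos h]
    dsimp only
    rw [hr]
    simp [List.reverse_cons, List.append_assoc]
termination_by ((hi + 1 - j).toNat, 0)
decreasing_by
  · have := scanRun_ge states (pvGetS states j) hi j
    omega
  · omega

end

theorem runsOf_eq_runsSpec (states : List String) (lo hi : Int) :
    runsOf states lo hi = runsSpec states lo hi := by
  unfold runsOf
  rw [foldRun_spec states hi lo [] (by intro v0 s0 e0 rest heq _; cases heq)]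
  simp

theorem runsSpec_congr (s1 s2 : List String) (lo hi : Int)
    (hag : ∀ i : Int, lo ≤ i → i ≤ hi → pvGetS s1 i = pvGetS s2 i) :
    runsSpec s1 lo hi = runsSpec s2 lo hi := by
  rw [runsSpec]
  conv_rhs => rw [runsSpec]
  by_cases h : lo ≤ hi
  · rw [dif_pos h, dif_pos h]
    have hv : pvGetS s1 lo = pvGetS s2 lo := hag lo le_rfl h
    have hs : scanRun s1 (pvGetS s2 lo) hi lo = scanRun s2 (pvGetS s2 lo) hi lo :=
      scanRun_congr s1 s2 (pvGetS s2 lo) hi lo (fun i h1 h2 => hag i (by omega) h2)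
    have hge := scanRun_ge s1 (pvGetS s2 lo) hi lo
    show (pvGetS s1 lo, lo, scanRun s1 (pvGetS s1 lo) hi lo) ::
        runsSpec s1 (scanRun s1 (pvGetS s1 lo) hi lo + 1) hi
      = (pvGetS s2 lo, lo, scanRun s2 (pvGetS s2 lo) hi lo) ::
        runsSpec s2 (scanRun s2 (pvGetS s2 lo) hi lo + 1) hi
    rw [hv, hs, runsSpec_congr s1 s2 (scanRun s2 (pvGetS s2 lo) hi lo + 1) hi
      (fun i h1 h2 => hag i (by rw [hs] at hge; omega) h2)]
  · rw [dif_neg h, dif_neg h]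
termination_by (hi + 1 - lo).toNat
decreasing_by
  have := scanRun_ge s1 (pvGetS s1 lo) hi lo
  omega

theorem processRangeF_invar (start e ml : Int) :
    ∀ (f1 : Nat) (idx : Int) (states : List String) (changed : Bool) (f2 : Nat),
      (e + 1 - idx).toNat ≤ f1 → (e + 1 - idx).toNat ≤ f2 →
      processRangeF f1 states start e ml idx changed
        = processRangeF f2 states start e ml idx changed := by
  intro f1
  induction f1 with
  | zero =>
    intro idx states changed f2 h1 h2
    cases f2 with
    | zero => rfl
    | succ f2 =>
      dsimp only [processRangeF]
      rw [if_neg (by omega)]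
  | succ f1 ih =>
    intro idx states changed f2 h1 h2
    cases f2 with
    | zero =>
      dsimp only [processRangeF]
      rw [if_neg (by omega)]
    | succ f2 =>
      dsimp only [processRangeF]
      by_cases h : idx ≤ e
      · rw [if_pos h, if_pos h]
        have hge := scanRun_ge states (pvGetS states idx) e idx
        by_cases hcond : pvGetS states idx ≠ "mixed" ∧
            scanRun states (pvGetS states idx) e idx - idx + 1 < ml
        · rw [if_pos hcond, if_pos hcond]
          exact ih _ _ _ f2 (by omega) (by omega)
        · rw [if_neg hcond, if_neg hcond]
          exact ih _ _ _ f2 (by omega) (by omega)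
      · rw [if_neg h, if_neg h]

theorem processRange_eq (states : List String) (start e ml idx : Int) (changed : Bool) :
    processRange states start e ml idx changed =
      if idx ≤ e then
        (if pvGetS states idx ≠ "mixed" ∧
            scanRun states (pvGetS states idx) e idx - idx + 1 < ml then
          processRange (replaceRange states idx (scanRun states (pvGetS states idx) e idx)
            (if ((if idx - 1 ≥ start then PySem.List.pyGet? states (idx - 1) else none) = (if scanRun states (pvGetS states idx) e idx + 1 ≤ e then PySem.List.pyGet? states (scanRun states (pvGetS states idx) e idx + 1) else none)) ∧ (if idx - 1 ≥ start then PySem.List.pyGet? states (idx - 1) else none) ≠ none ∧ (if idx - 1 ≥ start then PySem.List.pyGet? states (idx - 1) else none) ≠ some "mixed" then (if idx - 1 ≥ start then PySem.List.pyGet? states (idx - 1) else none).getD "" else if (if scanRun states (pvGetS states idx) e idx + 1 ≤ e then PySem.List.pyGet? states (scanRun states (pvGetS states idx) e idx + 1) else none) ≠ none ∧ (if scanRun states (pvGetS states idx) e idx + 1 ≤ e then PySem.List.pyGet? states (scanRun states (pvGetS states idx) e idx + 1) else none) ≠ some "mixed" then (if scanRun states (pvGetS states idx) e idx + 1 ≤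 e then PySem.List.pyGet? states (scanRun states (pvGetS states idx) e idx + 1) else none).getD "" else if (if idx - 1 ≥ start then PySem.List.pyGet? states (idx - 1) else none) ≠ none ∧ (if idx - 1 ≥ start then PySem.List.pyGet? states (idx - 1) else none) ≠ some "mixed" then (if idx - 1 ≥ start then PySem.List.pyGet? states (idx - 1) else none).getD "" else "forward")) start e ml (scanRun states (pvGetS states idx) e idx + 1) true
        else processRange states start e ml (scanRun states (pvGetS states idx) e idx + 1) changed)
      else (states, changed) := by
  unfold processRange
  by_cases h : idx ≤ e
  · have h1 : (e + 1 - idx).toNat = (e - idx).toNat + 1 := by omega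
    conv_lhs => rw [h1]
    dsimp only [processRangeF]
    rw [if_pos h, if_pos h]
    have hge := scanRun_ge states (pvGetS states idx) e idx
    have hle := scanRun_le states (pvGetS states idx) e idx h
    by_cases hcond : pvGetS states idx ≠ "mixed" ∧
        scanRun states (pvGetS states idx) e idx - idx + 1 < ml
    · rw [if_pos hcond, if_pos hcond]
      exact processRangeF_invar start e ml _ _ _ _ _ (by omega) (by omega)
    · rw [if_neg hcond, if_neg hcond]
      exact processRangeF_invar start e ml _ _ _ _ _ (by omega) (by omega)
  · rw [if_neg h]
    cases hn : (e + 1 - idx).toNat with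
    | zero => rfl
    | succ n =>
      dsimp only [processRangeF]
      rw [if_neg h]

-- A's four-way neighbor decision equals B's three-way one
theorem newDecision_eq (left right : Option String) :
    (if left = right ∧ left ≠ none ∧ left ≠ some "mixed" then left.getD ""
     else if right ≠ none ∧ right ≠ some "mixed" then right.getD ""
     else if left ≠ none ∧ left ≠ some "mixed" then left.getD ""
     else "forward")
    = (if right ≠ none ∧ right ≠ some "mixed" then
        if left = right then left.getD "" else right.getD ""
      else if left ≠ none ∧ left ≠ some "mixed" then left.getD ""
      else "forward") := by
  by_cases hlr : left = right
  · subst hlr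
    by_cases hok : left ≠ none ∧ left ≠ some "mixed"
    · rw [if_pos ⟨rfl, hok⟩, if_pos hok, if_pos rfl]
    · rw [if_neg (by tauto), if_neg hok, if_neg hok, if_neg hok]
  · rw [if_neg (by tauto)]
    by_cases hr : right ≠ none ∧ right ≠ some "mixed"
    · rw [if_pos hr, if_pos hr, if_neg hlr]
    · rw [if_neg hr, if_neg hr]

theorem main_lemma (ml start e : Int) :
    ∀ (N : Nat) (idx : Int) (states : List String) (changed : Bool),
      (e + 1 - idx).toNat ≤ N → 0 ≤ idx → start ≤ idx → e ≤ (states.length : Int) - 1 →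
      procRuns ml start (runsSpec states idx e) states changed =
        processRange states start e ml idx changed := by
  intro N
  induction N with
  | zero =>
    intro idx states changed hN h0 hs hl
    rw [runsSpec, dif_neg (by omega), processRange_eq, if_neg (by omega)]
    rfl
  | succ N ih =>
    intro idx states changed hN h0 hs hl
    by_cases h : idx ≤ e
    · rw [processRange_eq, if_pos h, runsSpec, dif_pos h]
      have hge := scanRun_ge states (pvGetS states idx) e idx
      have hle := scanRun_le states (pvGetS states idx) e idx h
      rw [procRuns]
      dsimp only
      have hright : (runsSpec states (scanRun states (pvGetS states idx) e idx + 1) e).head?.map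
            (fun t => t.1)
          = (if scanRun states (pvGetS states idx) e idx + 1 ≤ e then
              PySem.List.pyGet? states (scanRun states (pvGetS states idx) e idx + 1)
            else none) := by
        by_cases h2 : scanRun states (pvGetS states idx) e idx + 1 ≤ e
        · rw [if_pos h2, runsSpec, dif_pos h2,
            pyGet?_valid states _ (by omega) (by omega)]
          rfl
        · rw [if_neg h2, runsSpec, dif_neg h2]
          rfl
      rw [hright]
      by_cases hcond : pvGetS states idx ≠ "mixed" ∧
          scanRun states (pvGetS states idx) e idx - idx + 1 < ml
      · rw [if_pos hcond, if_pos hcond]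
        rw [← newDecision_eq]
        have hwr' : ∀ v, replaceRange states idx (scanRun states (pvGetS states idx) e idx) v =
            wr states idx (scanRun states (pvGetS states idx) e idx + 1) v := by
          intro v
          rw [replaceRange, wr, max_eq_right h0, min_eq_right (by omega)]
        generalize (if ((if idx - 1 ≥ start then PySem.List.pyGet? states (idx - 1) else none) = (if scanRun states (pvGetS states idx) e idx + 1 ≤ e then PySem.List.pyGet? states (scanRun states (pvGetS states idx) e idx + 1) else none)) ∧ (if idx - 1 ≥ start then PySem.List.pyGet? states (idx - 1) else none) ≠ none ∧ (if idx - 1 ≥ start then PySem.List.pyGet? states (idx - 1) else none) ≠ some "mixed" then (if idx - 1 ≥ start then PySem.List.pyGet? states (idx - 1) else none).getD "" else if (if scanRun states (pvGetS states idx) e idx + 1 ≤ e then PySem.List.pyGet? states (scanRun states (pvGetS states idx) e idx + 1) else none) ≠ none ∧ (if scanRun states (pvGetS states idx) e idx + 1 ≤ e then PySem.List.pyGet? states (scanRun states (pvGetS states idx) e idx + 1) else none) ≠ some "mixed" then (if scanRun states (pvGetS states idx) e idx + 1 ≤ e then PySem.List.pyGet? states (scanRun states (pvGetS states idx) e idx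 + 1) else none).getD "" else if (if idx - 1 ≥ start then PySem.List.pyGet? states (idx - 1) else none) ≠ none ∧ (if idx - 1 ≥ start then PySem.List.pyGet? states (idx - 1) else none) ≠ some "mixed" then (if idx - 1 ≥ start then PySem.List.pyGet? states (idx - 1) else none).getD "" else "forward") = nv
        have hwrB : List.foldl (fun st i => PySem.List.pySetD st i nv) states
            (PySem.List.pyRange idx (scanRun states (pvGetS states idx) e idx + 1) 1)
            = wr states idx (scanRun states (pvGetS states idx) e idx + 1) nv := rfl
        rw [hwrB, hwr' nv]
        have hlen : (wr states idx (scanRun states (pvGetS states idx) e idx + 1) nv).length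
            = states.length := wr_length states idx _ nv
        rw [runsSpec_congr states (wr states idx (scanRun states (pvGetS states idx) e idx + 1) nv)
          (scanRun states (pvGetS states idx) e idx + 1) e
          (by
            intro i h1 h2
            rw [wr_pvGetS states idx _ nv h0 i (by omega), if_neg (by omega)])]
        exact ih (scanRun states (pvGetS states idx) e idx + 1)
          (wr states idx (scanRun states (pvGetS states idx) e idx + 1) nv) true
          (by omega) (by omega) (by omega) (by omega)
      · rw [if_neg hcond, if_neg hcond]
        exact ih (scanRun states (pvGetS states idx) e idx + 1) states changed
          (by omega) (by omega) (by omega) hl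
    · rw [runsSpec, dif_neg h, processRange_eq, if_neg h]
      rfl

theorem step_eq (ml : Int) (acc : List String × Bool) (r : Int × Int) :
    processRange acc.1 r.1 (min ((acc.1.length : Int) - 1) r.2) ml (max 0 r.1) acc.2 =
      procRuns ml r.1
        (runsOf acc.1 (max 0 r.1) (min ((acc.1.length : Int) - 1) r.2)) acc.1 acc.2 := by
  obtain ⟨st, ch⟩ := acc
  dsimp only
  rw [runsOf_eq_runsSpec]
  exact (main_lemma ml r.1 (min ((st.length : Int) - 1) r.2)
    ((min ((st.length : Int) - 1) r.2 + 1 - max 0 r.1).toNat) (max 0 r.1) st ch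
    le_rfl (le_max_left 0 r.1) (le_max_right 0 r.1) (by omega)).symm

theorem pass_eq (ml : Int) (ranges : List (Int × Int)) (states : List String) :
    passA ml ranges states = passB ml ranges states := by
  unfold passA passB
  have h : ∀ (l : List (Int × Int)) (acc : List String × Bool),
      l.foldl (fun acc r =>
        processRange acc.1 r.1 (min ((acc.1.length : Int) - 1) r.2) ml (max 0 r.1) acc.2) acc
      = l.foldl (fun acc r =>
        procRuns ml r.1
          (runsOf acc.1 (max 0 r.1) (min ((acc.1.length : Int) - 1) r.2)) acc.1 acc.2) acc := by
    intro l
    induction l with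
    | nil => intro acc; rfl
    | cons x xs ihx =>
      intro acc
      rw [List.foldl_cons, List.foldl_cons, step_eq ml acc x]
      exact ihx _
  exact h ranges (states, false)

-- ===== VERDICT (by name: the statement is the Claim_ definition above) =====
theorem absorb_short_py_spec : Claim_equal_absorb_short_py := by
  intro states loss_intervals min_len _ _
  unfold Spec_absorb_short_py absorb_short_py absorb_short_py_alt
  simp only [pass_eq]
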